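-- pv_equiv track=rewrite | github.com/jaycorner04/Spl-website | python_backend/db_layer.py | _prepare_query
-- ===== SOURCE A (Python) =====
-- from typing import Any, Callable
--
-- def _prepare_query(query: str, params: tuple[Any, ...] = ()) -> tuple[str, list[dict[str, Any]]]:
--     pieces: list[str] = []
--     parameters: list[dict[str, Any]] = []
--     index = 0
--
--     for character in str(query):
--         if character == "?":
--             name = f"@p{index}"
--             pieces.append(name)
--             parameters.append({"name": name, "value": params[index] if index < len(params) else None})
--             index += 1
--         else:
--             pieces.append(character)
--
--     if index != len(params):
--         raise ValueError("SQL parameter count does not match placeholder count.")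
--
--     return "".join(pieces), parameters
-- ===== SOURCE B (Python) =====
-- def _prepare_query(query, params=()):
--     parts = str(query).split("?")
--     n = len(parts) - 1
--     if n != len(params):
--         raise ValueError("SQL parameter count does not match placeholder count.")
--     rebuilt = parts[0] + "".join(f"@p{i}" + parts[i + 1] for i in range(n))
--     parameters = [{"name": f"@p{i}", "value": params[i]} for i in range(n)]
--     return rebuilt, parameters
-- ===== Notes on version B (the rewrite author's own statement) =====
-- stated objective: simpler
-- what changed: Replaces A's per-character accumulation loop (pieces list + running index) by splitting the query on '?' once and rebuilding the string and the parameter list by index over the placeholder count.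
-- outside the precondition, e.g. on _prepare_query('a?b', ()): A raises ValueError, B raises ValueError; on _prepare_query('?', ()): A raises ValueError, B raises ValueError
import Mathlib
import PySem

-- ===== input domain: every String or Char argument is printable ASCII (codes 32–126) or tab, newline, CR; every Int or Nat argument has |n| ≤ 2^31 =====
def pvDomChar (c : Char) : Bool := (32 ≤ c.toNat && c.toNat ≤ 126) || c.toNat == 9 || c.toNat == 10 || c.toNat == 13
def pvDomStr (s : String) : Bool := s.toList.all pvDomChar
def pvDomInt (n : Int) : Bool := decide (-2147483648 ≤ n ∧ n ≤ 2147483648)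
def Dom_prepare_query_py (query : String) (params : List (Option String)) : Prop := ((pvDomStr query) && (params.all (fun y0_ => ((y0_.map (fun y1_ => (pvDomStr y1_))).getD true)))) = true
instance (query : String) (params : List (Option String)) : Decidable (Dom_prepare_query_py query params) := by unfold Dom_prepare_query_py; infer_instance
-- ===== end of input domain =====

-- B replaces A's per-character loop by split-on-'?' plus an indexed rebuild (objective: simpler);
-- equality of the RETURN value is proved on Pre_ (placeholder count = parameter count; elsewhere both raise ValueError).

-- ===== PORT A =====
-- the body of A's for-loop: state = (pieces, parameters, index)
def pvStepA (params : List (Option String))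
    (s : List String × List (List (String × Option String)) × Int) (c : Char) :
    List String × List (List (String × Option String)) × Int :=
  if c = '?' then
    let name := "@p" ++ PySem.Int.toStr s.2.2
    (s.1 ++ [name],
     s.2.1 ++ [[("name", some name),
                ("value", if s.2.2 < (params.length : Int) then PySem.List.pyGetD params s.2.2 none else none)]],
     s.2.2 + 1)
  else
    (s.1 ++ [c.toString], s.2.1, s.2.2)

def prepare_query_py (query : String) (params : List (Option String)) :
    String × (List (List (String × Option String))) :=
  -- for character in str(query): …   (the final `index != len(params)` ValueError is excluded by Pre_)
  let st := query.toList.foldl (pvStepA params) ([], [], 0)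
  (PySem.Str.join "" st.1, st.2.1)

-- ===== PORT B =====
def prepare_query_py_alt (query : String) (params : List (Option String)) :
    String × (List (List (String × Option String))) :=
  -- parts = str(query).split("?"); sep "?" is non-empty, so split? never returns none
  let parts := (PySem.Str.split? query "?").getD []
  let n := parts.length - 1
  -- if n != len(params): raise ValueError — excluded by Pre_
  -- parts[0] / parts[i+1] / params[i] are always in range here (split returns ≥ 1 part; i < n)
  let rebuilt := parts.headD "" ++
    PySem.Str.join "" ((List.range n).map (fun (i : Nat) => ("@p" ++ PySem.Int.toStr (i : Int)) ++ parts.getD (i + 1) ""))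
  let parameters := (List.range n).map (fun (i : Nat) =>
    [("name", some ("@p" ++ PySem.Int.toStr (i : Int))), ("value", (PySem.List.pyGet? params (i : Int)).getD none)])
  (rebuilt, parameters)

-- ===== PRECONDITION & SPEC =====
-- Pre_ excludes exactly the inputs where the '?'-count differs from len(params): there A raises ValueError (and so does B).
def Pre_prepare_query_py (query : String) (params : List (Option String)) : Prop :=
  query.toList.count '?' = params.length
instance (query : String) (params : List (Option String)) : Decidable (Pre_prepare_query_py query params) := by unfold Pre_prepare_query_py; infer_instance

def pvWitness_prepare_query_py : String × List (Option String) :=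
  ("SELECT * FROM t WHERE a = ? AND b = ?", [some "1", none])

def Spec_prepare_query_py (query : String) (params : List (Option String)) (out : String × (List (List (String × Option String)))) : Prop := out = prepare_query_py_alt query params
instance (query : String) (params : List (Option String)) (out : String × (List (List (String × Option String)))) : Decidable (Spec_prepare_query_py query params out) := by unfold Spec_prepare_query_py; infer_instance

-- ===== CLAIM (what is proved, stated in full; the proofs are below) =====
def Claim_equal_prepare_query_py : Prop := ∀ (query : String) (params : List (Option String)), Dom_prepare_query_py query params → Pre_prepare_query_py query params → Spec_prepare_query_py query params (prepare_query_py query params)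

-- ===== LEMMAS AND PROOFS =====

-- what A's loop emits from position i on: the characters of the rebuilt string …
def pvPiecesC (cs : List Char) (i : Int) : List Char :=
  match cs with
  | [] => []
  | c :: r => if c = '?' then ("@p" ++ PySem.Int.toStr i).toList ++ pvPiecesC r (i + 1) else c :: pvPiecesC r i

-- … the pieces as A collects them (a list of strings) …
def pvPiecesS (cs : List Char) (i : Int) : List String :=
  match cs with
  | [] => []
  | c :: r => if c = '?' then ("@p" ++ PySem.Int.toStr i) :: pvPiecesS r (i + 1) else c.toString :: pvPiecesS r i

-- … and the parameter dictionaries it appends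
def pvEntsC (params : List (Option String)) (cs : List Char) (i : Int) :
    List (List (String × Option String)) :=
  match cs with
  | [] => []
  | c :: r =>
    if c = '?' then
      [("name", some ("@p" ++ PySem.Int.toStr i)),
       ("value", if i < (params.length : Int) then PySem.List.pyGetD params i none else none)] :: pvEntsC params r (i + 1)
    else pvEntsC params r i

theorem pvFoldA (params : List (Option String)) :
    ∀ (cs : List Char) (pieces : List String) (parameters : List (List (String × Option String))) (i : Int),
    cs.foldl (pvStepA params) (pieces, parameters, i) =
      (pieces ++ pvPiecesS cs i, parameters ++ pvEntsC params cs i, i + cs.count '?') := by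
  intro cs
  induction cs with
  | nil => intro pieces parameters i; simp [pvPiecesS, pvEntsC]
  | cons c r ih =>
    intro pieces parameters i
    by_cases hc : c = '?'
    · subst hc
      simp [List.foldl_cons, pvStepA, ih, pvPiecesS, pvEntsC]
      omega
    · simp [List.foldl_cons, pvStepA, hc, ih, pvPiecesS, pvEntsC]

theorem pvJoinEmpty (l : List (List Char)) : PySem.Chars.join [] l = l.flatten := by
  induction l with
  | nil => simp [PySem.Chars.join_nil]
  | cons p rest ih =>
    cases rest with
    | nil => simp [PySem.Chars.join_singleton]
    | cons q rs => simp [PySem.Chars.join_cons_cons] at ih ⊢; simp [ih]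

theorem pvJoinPieces (cs : List Char) (i : Int) :
    PySem.Chars.join [] ((pvPiecesS cs i).map String.toList) = pvPiecesC cs i := by
  rw [pvJoinEmpty]
  induction cs generalizing i with
  | nil => simp [pvPiecesS, pvPiecesC]
  | cons c r ih =>
    by_cases hc : c = '?'
    · subst hc; simp [pvPiecesS, pvPiecesC, ih]
    · simp [pvPiecesS, pvPiecesC, hc, ih]

theorem pvSplitGo (fuel : Nat) :
    ∀ (cs cur : List Char) (acc : List (List Char)), cs.length ≤ fuel →
    PySem.Chars.splitOn.go ['?'] fuel cs cur acc =
      acc.reverse ++ List.modifyHead (fun t => cur.reverse ++ t) (List.splitOnP (· == '?') cs) := by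
  induction fuel with
  | zero =>
    intro cs cur acc h
    have : cs = [] := List.length_eq_zero_iff.mp (Nat.le_zero.mp h)
    subst this
    simp [PySem.Chars.splitOn.go, List.splitOnP_nil]
  | succ f ih =>
    intro cs cur acc h
    cases cs with
    | nil => simp [PySem.Chars.splitOn.go, List.splitOnP_nil]
    | cons c rest =>
      rw [PySem.Chars.splitOn.go]
      by_cases hc : c = '?'
      · subst hc
        have hp : List.isPrefixOf ['?'] ('?' :: rest) = true := by simp [List.isPrefixOf]
        simp only [hp, if_true]
        have hdrop : List.drop (['?'] : List Char).length ('?' :: rest) = rest := rfl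
        rw [hdrop, ih rest [] (cur.reverse :: acc) (by simpa using Nat.le_of_succ_le_succ h)]
        rw [List.splitOnP_cons]
        cases hsp : List.splitOnP (fun x => x == '?') rest <;> simp [List.modifyHead]
      · have hp : List.isPrefixOf ['?'] (c :: rest) = false := by
          simp [List.isPrefixOf]; exact fun h => absurd h.symm hc
        simp only [hp, Bool.false_eq_true, if_false]
        rw [ih rest (c :: cur) acc (by simpa using Nat.le_of_succ_le_succ h)]
        rw [List.splitOnP_cons]
        simp only [beq_iff_eq, hc, if_false]
        obtain ⟨p0, ps, hps⟩ := List.exists_cons_of_ne_nil (List.splitOnP_ne_nil (· == '?') rest)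
        simp [hps, List.modifyHead]

theorem pvSplitOnChar (cs : List Char) :
    PySem.Chars.splitOn cs ['?'] = List.splitOnP (· == '?') cs := by
  unfold PySem.Chars.splitOn
  rw [pvSplitGo (cs.length + 1) cs [] [] (by omega)]
  obtain ⟨p0, ps, hps⟩ := List.exists_cons_of_ne_nil (List.splitOnP_ne_nil (· == '?') cs)
  simp [hps, List.modifyHead]

theorem pvLenSplit (cs : List Char) :
    (List.splitOnP (· == '?') cs).length = cs.count '?' + 1 := by
  induction cs with
  | nil => simp [List.splitOnP_nil]
  | cons c r ih =>
    rw [List.splitOnP_cons]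
    by_cases hc : c = '?'
    · subst hc; simp [ih]
    · simp [hc, ih]

theorem pvPiecesSplit (cs : List Char) (i : Int) :
    pvPiecesC cs i =
      (List.splitOnP (· == '?') cs).headD [] ++
        (List.range ((List.splitOnP (· == '?') cs).length - 1)).flatMap
          (fun (j : Nat) => ("@p" ++ PySem.Int.toStr (i + (j : Int))).toList ++ (List.splitOnP (· == '?') cs).getD (j + 1) []) := by
  induction cs generalizing i with
  | nil => simp [pvPiecesC, List.splitOnP_nil]
  | cons c r ih =>
    obtain ⟨p0, ps, hps⟩ := List.exists_cons_of_ne_nil (List.splitOnP_ne_nil (· == '?') r)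
    rw [List.splitOnP_cons]
    by_cases hc : c = '?'
    · subst hc
      rw [pvPiecesC]
      simp only [beq_self_eq_true, if_true, ih (i + 1), hps, List.headD_cons,
        List.length_cons, Nat.add_sub_cancel, List.range_succ_eq_map, List.flatMap_cons,
        List.flatMap_map, Nat.cast_zero, add_zero, List.getD_cons_zero, List.getD_cons_succ,
        List.nil_append]
      have hfun : (fun j : Nat => ("@p" ++ PySem.Int.toStr (i + ↑j.succ)).toList ++ ps.getD j []) =
             (fun j : Nat => ("@p" ++ PySem.Int.toStr (i + 1 + (j : Int))).toList ++ ps.getD j []) := by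
        funext j
        have h2 : i + ↑j.succ = i + 1 + (j : Int) := by push_cast; ring
        rw [h2]
      rw [hfun]
      simp [List.append_assoc]
    · rw [pvPiecesC]
      simp only [beq_iff_eq, hc, if_false, ih i, hps, List.modifyHead,
        List.headD_cons, List.length_cons, Nat.add_sub_cancel, List.getD_cons_succ, List.cons_append]

theorem pvEntsSplit (params : List (Option String)) (cs : List Char) (i : Int) :
    pvEntsC params cs i =
      (List.range ((List.splitOnP (· == '?') cs).length - 1)).map
        (fun (j : Nat) => [("name", some ("@p" ++ PySem.Int.toStr (i + (j : Int)))),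
                   ("value", if i + (j : Int) < (params.length : Int) then PySem.List.pyGetD params (i + (j : Int)) none else none)]) := by
  induction cs generalizing i with
  | nil => simp [pvEntsC, List.splitOnP_nil]
  | cons c r ih =>
    obtain ⟨p0, ps, hps⟩ := List.exists_cons_of_ne_nil (List.splitOnP_ne_nil (· == '?') r)
    rw [List.splitOnP_cons]
    by_cases hc : c = '?'
    · subst hc
      rw [pvEntsC]
      simp only [beq_self_eq_true, if_true, ih (i + 1), hps, List.length_cons,
        Nat.add_sub_cancel, List.range_succ_eq_map, List.map_cons, List.map_map, Nat.cast_zero,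
        add_zero]
      congr 1
      congr 1
      funext j
      simp only [Function.comp]
      have h2 : i + ↑j.succ = i + 1 + (j : Int) := by push_cast; ring
      rw [h2]
    · rw [pvEntsC]
      simp only [beq_iff_eq, hc, if_false, ih i, hps, List.modifyHead, List.length_cons]

-- ===== VERDICT (by name: the statement is the Claim_ definition above) =====
theorem prepare_query_py_spec : Claim_equal_prepare_query_py := by
  intro query params _hdom hpre
  unfold Spec_prepare_query_py prepare_query_py prepare_query_py_alt
  have hpre' : query.toList.count '?' = params.length := hpre
  obtain ⟨p0, ps, hps⟩ := List.exists_cons_of_ne_nil (List.splitOnP_ne_nil (· == '?') query.toList)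
  have hsplit : (PySem.Str.split? query "?").getD [] = (p0 :: ps).map String.ofList := by
    simp [PySem.Str.split?, PySem.Chars.split?, pvSplitOnChar, hps]
  have hlen : ps.length = params.length := by
    have h := pvLenSplit query.toList
    rw [hps] at h; simp at h; omega
  rw [pvFoldA params query.toList [] [] 0, hsplit]
  simp only [Prod.mk.injEq]
  refine ⟨?_, ?_⟩
  · -- the rebuilt strings agree
    apply String.toList_inj.mp
    rw [PySem.Str.toList_join]
    simp only [List.nil_append]
    have he : ("" : String).toList = ([] : List Char) := rfl
    rw [he, pvJoinPieces, pvPiecesSplit, hps]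
    rw [String.toList_append, PySem.Str.toList_join, he, pvJoinEmpty]
    simp only [List.map_cons, List.length_cons, List.length_map, Nat.add_sub_cancel, hlen,
      List.headD_cons, List.map_map]
    have hg : (String.toList ∘ fun (i : Nat) =>
          ("@p" ++ PySem.Int.toStr (i : Int)) ++ (String.ofList p0 :: List.map String.ofList ps).getD (i + 1) "") =
        (fun (j : Nat) => ("@p" ++ PySem.Int.toStr ((0 : Int) + (j : Int))).toList ++ (p0 :: ps).getD (j + 1) []) := by
      funext j
      simp only [Function.comp, String.toList_append, List.getD_cons_succ, zero_add]
      have hof : ("" : String) = String.ofList [] := rfl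
      rw [hof, List.getD_map]
      simp
    rw [hg, ← List.flatMap_def]
    simp
  · -- the parameter lists agree
    rw [pvEntsSplit, hps]
    simp only [List.length_cons, List.length_map, Nat.add_sub_cancel, hlen]
    apply List.map_congr_left
    intro j hj
    have hj' : j < params.length := List.mem_range.mp hj
    simp only [zero_add]
    have hv : ((PySem.List.pyGet? params (j : Int)).getD none) =
        (if (j : Int) < (params.length : Int) then PySem.List.pyGetD params (j : Int) none else none) := by
      rw [if_pos (by exact_mod_cast hj'), PySem.List.pyGet?_natCast, PySem.List.pyGetD_natCast]
      simp [List.getD, List.getElem?_eq_getElem hj']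
    rw [hv]
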